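-- pv_equiv track=rewrite | github.com/njriasan/tritonbench | .github/scripts/generate_tritonbench_matrix.py | benchmarks_from_pr_changes
-- ===== SOURCE A (Python) =====
-- CI_BENCHMARKS = ["nightly", "compile_time", "tlx"]
--
-- INFRA_TRIGGER_PATHS = {
--     ".github/scripts/generate_tritonbench_matrix.py",
--     ".github/workflows/benchmark.yml",
--     ".github/workflows/_linux-benchmark.yml",
-- }
--
-- def benchmarks_from_pr_changes(changed_files: list[str]) -> list[str]:
--     if not changed_files:
--         return CI_BENCHMARKS
--
--     changed = set(changed_files)
--     if changed & INFRA_TRIGGER_PATHS: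
--         return CI_BENCHMARKS
--
--     benchmarks: list[str] = []
--     for benchmark in CI_BENCHMARKS:
--         prefix = f"benchmarks/{benchmark}/"
--         if any(path.startswith(prefix) for path in changed):
--             benchmarks.append(benchmark)
--     return benchmarks
-- ===== SOURCE B (Python) =====
-- CI_BENCHMARKS = ["nightly", "compile_time", "tlx"]
--
-- INFRA_TRIGGER_PATHS = {
--     ".github/scripts/generate_tritonbench_matrix.py",
--     ".github/workflows/benchmark.yml",
--     ".github/workflows/_linux-benchmark.yml",
-- }
--
--
-- def benchmarks_from_pr_changes(changed_files: list[str]) -> list[str]: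
--     if not changed_files:
--         return CI_BENCHMARKS
--
--     triggered: set[str] = set()
--     for path in changed_files:
--         if path in INFRA_TRIGGER_PATHS:
--             return CI_BENCHMARKS
--         for name in CI_BENCHMARKS:
--             if path.startswith("benchmarks/" + name + "/"):
--                 triggered.add(name)
--     return [name for name in CI_BENCHMARKS if name in triggered]
-- ===== Notes on version B (the rewrite author's own statement) =====
-- stated objective: alternative
-- what changed: B inverts the traversal: one pass over changed_files (returning CI_BENCHMARKS early on the first infra path) accumulating a set of triggered benchmark names, then a final filter of CI_BENCHMARKS restores canonical order, instead of A's outer loop over benchmarks with an any() scan of the whole path set per benchmark.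
import Mathlib
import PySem

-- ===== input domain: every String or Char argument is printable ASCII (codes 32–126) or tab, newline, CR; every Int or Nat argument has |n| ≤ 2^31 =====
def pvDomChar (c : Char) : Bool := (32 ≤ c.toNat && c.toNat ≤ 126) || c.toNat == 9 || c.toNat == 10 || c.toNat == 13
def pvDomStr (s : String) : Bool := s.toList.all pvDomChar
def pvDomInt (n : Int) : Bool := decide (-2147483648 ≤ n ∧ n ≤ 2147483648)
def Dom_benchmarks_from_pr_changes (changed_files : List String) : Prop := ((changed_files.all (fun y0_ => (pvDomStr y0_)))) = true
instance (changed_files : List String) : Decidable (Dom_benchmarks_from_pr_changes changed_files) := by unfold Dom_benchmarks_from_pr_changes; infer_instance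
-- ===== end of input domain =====

-- B replaces A's per-benchmark any() scans of the path set by one pass over changed_files
-- (early return on an infra path, a set of triggered names, final filter of CI_BENCHMARKS); same cost, different decomposition.

-- ===== PORT A =====
def pvCI : List String := ["nightly", "compile_time", "tlx"]

def pvINFRA : PySem.Set String :=
  PySem.Set.ofList [".github/scripts/generate_tritonbench_matrix.py",
                    ".github/workflows/benchmark.yml",
                    ".github/workflows/_linux-benchmark.yml"]

def benchmarks_from_pr_changes (changed_files : List String) : List String :=
  if changed_files = [] then pvCI
  else
    let changed : PySem.Set String := PySem.Set.ofList changed_files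
    if PySem.Set.inter changed pvINFRA ≠ [] then pvCI
    else
      -- any(path.startswith(prefix) for path in changed): order-independent, folded over the set's list
      pvCI.foldl (fun benchmarks benchmark =>
        let pfx := "benchmarks/" ++ benchmark ++ "/"
        if changed.any (fun path => PySem.Str.startswith path pfx) then benchmarks ++ [benchmark]
        else benchmarks) []

-- ===== PORT B =====
def pvBLoop (files : List String) (triggered : PySem.Set String) : List String :=
  match files with
  | [] => pvCI.filter (fun name => triggered.contains name)
  | path :: rest =>
    if pvINFRA.contains path then pvCI
    else
      pvBLoop rest (pvCI.foldl (fun t name =>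
        if PySem.Str.startswith path ("benchmarks/" ++ name ++ "/") then PySem.Set.add t name
        else t) triggered)

def benchmarks_from_pr_changes_alt (changed_files : List String) : List String :=
  if changed_files = [] then pvCI
  else pvBLoop changed_files PySem.Set.empty

-- ===== PRECONDITION & SPEC =====
def Spec_benchmarks_from_pr_changes (changed_files : List String) (out : List String) : Prop := out = benchmarks_from_pr_changes_alt changed_files
instance (changed_files : List String) (out : List String) : Decidable (Spec_benchmarks_from_pr_changes changed_files out) := by unfold Spec_benchmarks_from_pr_changes; infer_instance

-- ===== CLAIM (what is proved, stated in full; the proofs are below) =====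
def Claim_equal_benchmarks_from_pr_changes : Prop := ∀ (changed_files : List String), Dom_benchmarks_from_pr_changes changed_files → Spec_benchmarks_from_pr_changes changed_files (benchmarks_from_pr_changes changed_files)

-- ===== LEMMAS AND PROOFS =====

theorem mem_foldl_addIf (l : List String) (trig : PySem.Set String)
    (m : String → Bool) (x : String) :
    x ∈ l.foldl (fun t name => if m name then PySem.Set.add t name else t) trig ↔
      x ∈ trig ∨ (x ∈ l ∧ m x = true) := by
  induction l generalizing trig with
  | nil => simp
  | cons a l ih =>
    simp only [List.foldl_cons, List.mem_cons]
    by_cases h : m a = true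
    · rw [if_pos h, ih]
      simp only [PySem.Set.mem_add]
      constructor
      · rintro ((hx | rfl) | ⟨hx, hm⟩)
        · exact .inl hx
        · exact .inr ⟨.inl rfl, h⟩
        · exact .inr ⟨.inr hx, hm⟩
      · rintro (hx | ⟨(rfl | hx), hm⟩)
        · exact .inl (.inl hx)
        · exact .inl (.inr rfl)
        · exact .inr ⟨hx, hm⟩
    · rw [if_neg h, ih]
      constructor
      · rintro (hx | ⟨hx, hm⟩)
        · exact .inl hx
        · exact .inr ⟨.inr hx, hm⟩
      · rintro (hx | ⟨(rfl | hx), hm⟩)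
        · exact .inl hx
        · exact absurd hm h
        · exact .inr ⟨hx, hm⟩

theorem pvBLoop_characterization (files : List String) (trig : PySem.Set String) :
    pvBLoop files trig =
      if ∃ p ∈ files, p ∈ pvINFRA then pvCI
      else pvCI.filter (fun b =>
        decide (b ∈ trig ∨ ∃ p ∈ files,
          PySem.Str.startswith p ("benchmarks/" ++ b ++ "/") = true)) := by
  induction files generalizing trig with
  | nil =>
    simp only [pvBLoop, List.not_mem_nil, false_and, exists_false, if_false,
      exists_const, or_false]
    apply List.filter_congr
    intro b _
    rw [Bool.eq_iff_iff, PySem.Set.contains_iff, decide_eq_true_iff]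
  | cons path rest ih =>
    by_cases hi : path ∈ pvINFRA
    · simp [pvBLoop, hi]

    · have hi' : pvINFRA.contains path = false := by
        rw [← Bool.not_eq_true, PySem.Set.contains_iff]; exact hi
      simp only [pvBLoop, hi', Bool.false_eq_true, if_false, ih]
      by_cases hr : ∃ p ∈ rest, p ∈ pvINFRA
      · rw [if_pos hr, if_pos (by rcases hr with ⟨p, hp, hm⟩; exact ⟨p, .tail _ hp, hm⟩)]
      · have hcons : ¬ ∃ p ∈ path :: rest, p ∈ pvINFRA := by
          rintro ⟨p, hp, hm⟩
          cases hp with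
          | head => exact hi hm
          | tail _ h => exact hr ⟨p, h, hm⟩
        rw [if_neg hr, if_neg hcons]
        apply List.filter_congr
        intro b hb
        rw [decide_eq_decide]
        rw [mem_foldl_addIf]
        constructor
        · rintro ((h | ⟨_, hm⟩) | ⟨p, hp, hm⟩)
          · exact .inl h
          · exact .inr ⟨path, .head _, hm⟩
          · exact .inr ⟨p, .tail _ hp, hm⟩
        · rintro (h | ⟨p, hp, hm⟩)
          · exact .inl (.inl h)
          · cases hp with
            | head => exact .inl (.inr ⟨hb, hm⟩)
            | tail _ h => exact .inr ⟨p, h, hm⟩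

theorem inter_ne_nil_iff (cf : List String) :
    PySem.Set.inter (PySem.Set.ofList cf) pvINFRA ≠ [] ↔
      ∃ p ∈ cf, p ∈ pvINFRA := by
  rw [Ne, List.eq_nil_iff_forall_not_mem]
  push Not
  simp only [PySem.Set.mem_inter, PySem.Set.mem_ofList]

theorem foldl_append_if_id (p : String → Bool) (l acc : List String) :
    l.foldl (fun acc x => if p x then acc ++ [x] else acc) acc = acc ++ l.filter p := by
  induction l generalizing acc with
  | nil => simp
  | cons a l ih =>
    simp only [List.foldl_cons, List.filter_cons]
    by_cases h : p a = true
    · rw [if_pos h, if_pos h, ih, List.append_assoc]; rfl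
    · rw [if_neg h, if_neg h, ih]

-- ===== VERDICT (by name: the statement is the Claim_ definition above) =====
theorem benchmarks_from_pr_changes_spec : Claim_equal_benchmarks_from_pr_changes := by
  intro cf _
  unfold Spec_benchmarks_from_pr_changes benchmarks_from_pr_changes benchmarks_from_pr_changes_alt
  by_cases hnil : cf = []
  · simp [hnil]
  · simp only [if_neg hnil]
    rw [pvBLoop_characterization]
    by_cases hinfra : ∃ p ∈ cf, p ∈ pvINFRA
    · rw [if_pos ((inter_ne_nil_iff cf).2 hinfra), if_pos hinfra]
    · rw [if_neg (fun h => hinfra ((inter_ne_nil_iff cf).1 h)), if_neg hinfra,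
          foldl_append_if_id]
      simp only [List.nil_append]
      apply List.filter_congr
      intro b _
      rw [Bool.eq_iff_iff, List.any_eq_true, decide_eq_true_iff]
      simp only [PySem.Set.mem_ofList, PySem.Set.empty, List.not_mem_nil, false_or]
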